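-- pv_equiv track=rewrite | github.com/alangoldman/advent2020 | day14.py | enumerate_indexes
-- ===== SOURCE A (Python) =====
-- def enumerate_indexes(index):
--     result = []
--     try:
--         i = index.index('X')
--         new_index = index[:i]
--         sub_index = index[i+1:]
--         sub_result = enumerate_indexes(sub_index)
--         result += [new_index + '0' + e for e in sub_result]
--         result += [new_index + '1' + e for e in sub_result]
--         return result
--     except ValueError:
--         return [index]
-- ===== SOURCE B (Python) =====
-- def enumerate_indexes(index):
--     acc = ['']
--     for c in index:
--         if c == 'X':
--             acc = [p + b for p in acc for b in '01']
--         else: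
--             acc = [p + c for p in acc]
--     return acc
-- ===== Notes on version B (the rewrite author's own statement) =====
-- stated objective: simpler
-- what changed: Replaced A's recursion on the first wildcard (string.index, slicing and two mapped recursive copies) by a single left-to-right fold over the characters that maintains the list of completed prefixes.
import Mathlib
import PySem

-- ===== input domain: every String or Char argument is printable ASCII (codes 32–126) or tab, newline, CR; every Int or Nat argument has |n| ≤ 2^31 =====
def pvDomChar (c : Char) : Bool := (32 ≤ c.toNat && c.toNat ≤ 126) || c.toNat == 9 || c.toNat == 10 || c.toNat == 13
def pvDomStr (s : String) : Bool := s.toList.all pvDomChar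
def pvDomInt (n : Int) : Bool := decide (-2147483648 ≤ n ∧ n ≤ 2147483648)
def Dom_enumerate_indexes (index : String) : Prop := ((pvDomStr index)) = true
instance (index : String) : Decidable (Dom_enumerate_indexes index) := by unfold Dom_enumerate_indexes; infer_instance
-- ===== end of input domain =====

-- B replaces A's recursion on the first 'X' by a single left-to-right fold over the
-- characters that maintains the list of completed prefixes (objective: simpler).

-- ===== PORT A =====
-- A's recursion, on the character list: i = index.index('X') (ValueError = none),
-- new_index = s[:i], sub_index = s[i+1:], two mapped copies of the recursive result.
def enumerate_indexesA (s : List Char) : List (List Char) :=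
  match h : PySem.List.index? s 'X' with
  | some i =>
      let new_index := s.take i
      let sub_index := s.drop (i + 1)
      let sub_result := enumerate_indexesA sub_index
      sub_result.map (fun e => new_index ++ '0' :: e)
        ++ sub_result.map (fun e => new_index ++ '1' :: e)
  | none => [s]
termination_by s.length
decreasing_by
  obtain ⟨hk, -, -⟩ := PySem.List.getElem_of_index?_eq_some h
  simp only [List.length_drop]; omega

def enumerate_indexes (index : String) : List String :=
  (enumerate_indexesA index.toList).map String.ofList

-- ===== PORT B =====
-- Source B's loop body: one step of the fold over the characters.
def enumStepB (acc : List (List Char)) (c : Char) : List (List Char) :=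
  if c = 'X' then acc.flatMap (fun p => [p ++ ['0'], p ++ ['1']])
  else acc.map (fun p => p ++ [c])

def enumerate_indexes_alt (index : String) : List String :=
  (index.toList.foldl enumStepB [[]]).map String.ofList

-- ===== PRECONDITION & SPEC =====
def Spec_enumerate_indexes (index : String) (out : List String) : Prop := out = enumerate_indexes_alt index
instance (index : String) (out : List String) : Decidable (Spec_enumerate_indexes index out) := by unfold Spec_enumerate_indexes; infer_instance

-- ===== CLAIM (what is proved, stated in full; the proofs are below) =====
def Claim_equal_enumerate_indexes : Prop := ∀ (index : String), Dom_enumerate_indexes index → Spec_enumerate_indexes index (enumerate_indexes index)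

-- ===== LEMMAS AND PROOFS =====

-- B's fold acts on each accumulator element independently and in order.
theorem foldB_flatMap (s : List Char) (acc : List (List Char)) :
    s.foldl enumStepB acc
      = acc.flatMap (fun p => (s.foldl enumStepB [[]]).map (p ++ ·)) := by
  induction s generalizing acc with
  | nil => simp [List.flatMap_singleton']
  | cons c t ih =>
      simp only [List.foldl_cons]
      rw [ih (enumStepB acc c), ih (enumStepB [[]] c)]
      by_cases hc : c = 'X' <;>
        simp [enumStepB, hc, List.flatMap_assoc, List.flatMap_map,
              List.append_assoc, Function.comp_def]

-- On an 'X'-free segment the fold just appends the segment to every element.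
theorem foldB_no_X (s : List Char) (hs : 'X' ∉ s) (acc : List (List Char)) :
    s.foldl enumStepB acc = acc.map (fun p => p ++ s) := by
  induction s generalizing acc with
  | nil => simp
  | cons c t ih =>
      have hc : c ≠ 'X' := fun h => hs (h ▸ List.mem_cons_self ..)
      have ht : 'X' ∉ t := fun h => hs (List.mem_cons_of_mem _ h)
      simp [enumStepB, hc, ih ht, List.map_map, Function.comp]

-- A's recursion computes exactly B's fold.
theorem enumA_eq_foldB (s : List Char) :
    enumerate_indexesA s = s.foldl enumStepB [[]] := by
  induction hn : s.length using Nat.strong_induction_on generalizing s with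
  | _ n ih =>
  rw [enumerate_indexesA]
  match h : PySem.List.index? s 'X' with
  | none =>
      have hX : 'X' ∉ s := (PySem.List.index?_eq_none_iff s 'X').mp h
      simp [foldB_no_X s hX]
  | some i =>
      obtain ⟨pre, suf, hsplit, hlen, hpre⟩ := (PySem.List.index?_eq_some_iff s 'X' i).mp h
      have htake : s.take i = pre := by
        subst hsplit hlen; simp
      have hdrop : s.drop (i + 1) = suf := by
        subst hsplit hlen; simp [List.drop_append]
      have hrec : enumerate_indexesA suf = suf.foldl enumStepB [[]] := by
        apply ih suf.length _ suf rfl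
        subst hsplit hn; simp; omega
      simp only [htake, hdrop, hrec]
      conv_rhs => rw [hsplit]
      rw [show pre ++ 'X' :: suf = (pre ++ ['X']) ++ suf by simp,
          List.foldl_append, List.foldl_append,
          foldB_no_X pre hpre [[]]]
      simp only [List.map_cons, List.map_nil, List.nil_append,
        List.foldl_cons, List.foldl_nil]
      rw [show enumStepB [pre] 'X' = [pre ++ ['0'], pre ++ ['1']] by simp [enumStepB],
          foldB_flatMap suf [pre ++ ['0'], pre ++ ['1']]]
      simp [List.append_assoc]

-- ===== VERDICT (by name: the statement is the Claim_ definition above) =====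
theorem enumerate_indexes_spec : Claim_equal_enumerate_indexes := by
  intro index _
  unfold Spec_enumerate_indexes enumerate_indexes enumerate_indexes_alt
  rw [enumA_eq_foldB]
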